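-- pv_equiv track=rewrite | github.com/anoidgit/crawler | customer.py | is_WebPage
-- ===== SOURCE A (Python) =====
-- def is_WebPage(url, real_url = None):
--
-- 	true_filter = [".html", ".htm", ".php", ".asp"]
-- 	false_filter = [".jpg", ".png", ".ico", ".gz", ".xz", ".bzip2", ".zip", ".rar", ".7z", ".pdf", ".doc", ".docx", ".ppt", ".pptx", ".xls", ".xlsx", ".swf", ".mp3", ".mp4", ".mkv"]
--
-- 	rs = True
-- 	if real_url is None:
-- 		real_url = url
-- 	real_url = real_url.lower()
--
-- 	for filter in true_filter:
-- 		if real_url.endswith(filter):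
-- 			return True
--
-- 	for filter in false_filter:
-- 		if real_url.endswith(filter):
-- 			rs = False
-- 			break
--
-- 	return rs
-- ===== SOURCE B (Python) =====
-- _EXT_TABLE = {
--     ".html": True, ".htm": True, ".php": True, ".asp": True,
--     ".jpg": False, ".png": False, ".ico": False, ".gz": False, ".xz": False,
--     ".bzip2": False, ".zip": False, ".rar": False, ".7z": False, ".pdf": False,
--     ".doc": False, ".docx": False, ".ppt": False, ".pptx": False,
--     ".xls": False, ".xlsx": False, ".swf": False, ".mp3": False,
--     ".mp4": False, ".mkv": False,
-- }
--
-- def is_WebPage(url, real_url=None):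
--     s = (real_url if real_url is not None else url).lower()
--     rev = []
--     for ch in reversed(s):
--         rev.append(ch)
--         if ch == '.':
--             break
--     ext = ''.join(reversed(rev)) if rev and rev[-1] == '.' else ''
--     return _EXT_TABLE.get(ext, True)
-- ===== Notes on version B (the rewrite author's own statement) =====
-- stated objective: idiomatic
-- what changed: Instead of scanning the lowercased URL twice with endswith against 24 suffix literals, B scans once backwards collecting characters up to the last dot (the extension) and decides with a single lookup in an extension-to-bool table with default True.
import Mathlib
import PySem

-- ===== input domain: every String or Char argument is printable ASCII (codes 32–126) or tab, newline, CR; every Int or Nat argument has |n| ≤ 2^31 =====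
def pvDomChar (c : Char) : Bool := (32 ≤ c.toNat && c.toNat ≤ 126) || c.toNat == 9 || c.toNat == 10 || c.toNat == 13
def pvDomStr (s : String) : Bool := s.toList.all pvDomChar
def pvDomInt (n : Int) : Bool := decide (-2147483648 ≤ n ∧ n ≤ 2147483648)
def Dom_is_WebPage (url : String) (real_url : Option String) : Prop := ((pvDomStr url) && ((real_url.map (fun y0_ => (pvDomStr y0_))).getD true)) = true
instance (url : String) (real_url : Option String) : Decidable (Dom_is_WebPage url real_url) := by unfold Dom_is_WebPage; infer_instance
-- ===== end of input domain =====

-- B replaces A's two repeated endswith scans by one backward scan that collects the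
-- characters up to the last '.' (the extension) and a single lookup of that extension
-- in an extension → Bool table with default True (objective: idiomatic).

-- ===== PORT A =====
def is_WebPage (url : String) (real_url : Option String) : Bool :=
  let true_filter : List (List Char) :=
    [".html".toList, ".htm".toList, ".php".toList, ".asp".toList]
  let false_filter : List (List Char) :=
    [".jpg".toList, ".png".toList, ".ico".toList, ".gz".toList, ".xz".toList,
     ".bzip2".toList, ".zip".toList, ".rar".toList, ".7z".toList, ".pdf".toList,
     ".doc".toList, ".docx".toList, ".ppt".toList, ".pptx".toList, ".xls".toList,
     ".xlsx".toList, ".swf".toList, ".mp3".toList, ".mp4".toList, ".mkv".toList]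
  let rs := true
  let r := match real_url with | none => url | some ru => ru
  let s := PySem.Chars.lower r.toList
  -- for-loop with early `return True` over true_filter, then for-loop with break over false_filter
  if true_filter.any (fun f => PySem.Chars.endswith s f) then true
  else if false_filter.any (fun f => PySem.Chars.endswith s f) then false
  else rs

-- ===== PORT B =====
-- _EXT_TABLE of Source B: extension → webpage? (missing extensions default to True)
def pvExtTable : PySem.Dict (List Char) Bool := PySem.Dict.mk
  [(['.','h','t','m','l'], true), (['.','h','t','m'], true),
   (['.','p','h','p'], true), (['.','a','s','p'], true),
   (['.','j','p','g'], false), (['.','p','n','g'], false), (['.','i','c','o'], false),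
   (['.','g','z'], false), (['.','x','z'], false), (['.','b','z','i','p','2'], false),
   (['.','z','i','p'], false), (['.','r','a','r'], false), (['.','7','z'], false),
   (['.','p','d','f'], false), (['.','d','o','c'], false), (['.','d','o','c','x'], false),
   (['.','p','p','t'], false), (['.','p','p','t','x'], false), (['.','x','l','s'], false),
   (['.','x','l','s','x'], false), (['.','s','w','f'], false), (['.','m','p','3'], false),
   (['.','m','p','4'], false), (['.','m','k','v'], false)]

-- Source B's for-loop over reversed(s) with append + break on '.' (recursion on the reversed list)
def pvBuildRev : List Char → List Char
  | [] => []
  | c :: cs => if c = '.' then [c] else c :: pvBuildRev cs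

def is_WebPage_alt (url : String) (real_url : Option String) : Bool :=
  let s := PySem.Chars.lower ((match real_url with | none => url | some ru => ru).toList)
  let rev := pvBuildRev s.reverse
  let ext := if rev.getLast? = some '.' then rev.reverse else []
  pvExtTable.getD ext true

-- ===== PRECONDITION & SPEC =====
def Spec_is_WebPage (url : String) (real_url : Option String) (out : Bool) : Prop := out = is_WebPage_alt url real_url
instance (url : String) (real_url : Option String) (out : Bool) : Decidable (Spec_is_WebPage url real_url out) := by unfold Spec_is_WebPage; infer_instance

-- ===== CLAIM (what is proved, stated in full; the proofs are below) =====
def Claim_equal_is_WebPage : Prop := ∀ (url : String) (real_url : Option String), Dom_is_WebPage url real_url → Spec_is_WebPage url real_url (is_WebPage url real_url)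

-- ===== LEMMAS AND PROOFS =====

/-- B's extension: reverse of the backward scan, when a '.' was found. -/
def pvExt (l : List Char) : List Char :=
  if (pvBuildRev l.reverse).getLast? = some '.' then (pvBuildRev l.reverse).reverse else []

/-- `pvBuildRev` hits `u ++ ['.']` (a dot-free `u`) exactly when that is a prefix of the scanned list. -/
theorem build_eq (u r : List Char) (hu : '.' ∉ u) :
    (u ++ ['.'] <+: r) ↔ pvBuildRev r = u ++ ['.'] := by
  induction r generalizing u with
  | nil =>
    constructor
    · intro h
      have := h.length_le
      simp at this
    · intro h
      have := congrArg List.length h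
      simp [pvBuildRev] at this
  | cons c cs ih =>
    cases u with
    | nil =>
      simp only [List.nil_append]
      by_cases hc : c = '.'
      · subst hc
        simp [pvBuildRev, List.cons_prefix_cons]
      · constructor
        · intro hp
          rw [List.cons_prefix_cons] at hp
          exact absurd hp.1 (fun h => hc h.symm)
        · intro h
          simp only [pvBuildRev, if_neg hc] at h
          injection h with h1 h2
          exact absurd h1 hc
    | cons a u' =>
      have ha : a ≠ '.' := fun h => hu (by rw [h]; exact List.mem_cons_self ..)
      have ht : '.' ∉ u' := fun h => hu (List.mem_cons_of_mem _ h)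
      rw [List.cons_append, List.cons_prefix_cons]
      by_cases hc : c = '.'
      · subst hc
        constructor
        · rintro ⟨h1, -⟩
          exact absurd h1 ha
        · intro h
          simp only [pvBuildRev] at h
          injection h with h1 h2
          exact absurd h1.symm ha
      · simp only [pvBuildRev, if_neg hc]
        constructor
        · rintro ⟨h1, h2⟩
          subst h1
          rw [(ih u' ht).mp h2]
        · intro h
          injection h with h1 h2
          exact ⟨h1.symm, (ih u' ht).mpr h2⟩

/-- A's `endswith` test against `'.' :: t` (dot-free `t`) asks whether B's extension IS `'.' :: t`. -/
theorem ends_ext (l t : List Char) (ht : '.' ∉ t) :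
    PySem.Chars.endswith l ('.'::t) = decide (pvExt l = '.'::t) := by
  have hu : '.' ∉ t.reverse := by simpa using ht
  have hstep : ('.'::t) <:+ l ↔ pvBuildRev l.reverse = t.reverse ++ ['.'] := by
    rw [← List.reverse_prefix]
    simpa using build_eq t.reverse l.reverse hu
  have hext : pvExt l = '.'::t ↔ pvBuildRev l.reverse = t.reverse ++ ['.'] := by
    unfold pvExt
    split_ifs with hg
    · constructor
      · intro h
        have := congrArg List.reverse h
        simpa using this
      · intro h
        rw [h]
        simp
    · constructor
      · intro h
        simp at h
      · intro h
        rw [h] at hg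
        simp at hg
  unfold PySem.Chars.endswith
  rcases Classical.em (('.'::t) <:+ l) with h | h
  · rw [List.isSuffixOf_iff_suffix.mpr h]
    simp [hext.mpr (hstep.mp h)]
  · have h2 : pvExt l ≠ '.'::t := fun hx => h (hstep.mpr (hext.mp hx))
    have hf : List.isSuffixOf ('.'::t) l = false := by
      cases hq : List.isSuffixOf ('.'::t) l
      · rfl
      · exact absurd (List.isSuffixOf_iff_suffix.mp hq) h
    rw [hf]
    simp [h2]

/-- the two filter scans of A, as a function of B's extracted extension, equal B's table lookup -/
theorem table_eq (e : List Char) :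
    (if (decide (e = ['.','h','t','m','l']) || (decide (e = ['.','h','t','m']) || (decide (e = ['.','p','h','p']) || decide (e = ['.','a','s','p'])))) then true
     else if (decide (e = ['.','j','p','g']) || (decide (e = ['.','p','n','g']) || (decide (e = ['.','i','c','o']) || (decide (e = ['.','g','z']) || (decide (e = ['.','x','z']) || (decide (e = ['.','b','z','i','p','2']) || (decide (e = ['.','z','i','p']) || (decide (e = ['.','r','a','r']) || (decide (e = ['.','7','z']) || (decide (e = ['.','p','d','f']) || (decide (e = ['.','d','o','c']) || (decide (e = ['.','d','o','c','x']) || (decide (e = ['.','p','p','t']) || (decide (e = ['.','p','p','t','x']) || (decide (e = ['.','x','l','s']) || (decide (e = ['.','x','l','s','x']) || (decide (e = ['.','s','w','f']) || (decide (e = ['.','m','p','3']) || (decide (e = ['.','m','p','4']) || decide (e = ['.','m','k','v'])))))))))))))))))))) then false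
     else true)
  = pvExtTable.getD e true := by
  by_cases h1 : e = ['.','h','t','m','l']
  · subst h1; decide
  by_cases h2 : e = ['.','h','t','m']
  · subst h2; decide
  by_cases h3 : e = ['.','p','h','p']
  · subst h3; decide
  by_cases h4 : e = ['.','a','s','p']
  · subst h4; decide
  by_cases h5 : e = ['.','j','p','g']
  · subst h5; decide
  by_cases h6 : e = ['.','p','n','g']
  · subst h6; decide
  by_cases h7 : e = ['.','i','c','o']
  · subst h7; decide
  by_cases h8 : e = ['.','g','z']
  · subst h8; decide
  by_cases h9 : e = ['.','x','z']
  · subst h9; decide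
  by_cases h10 : e = ['.','b','z','i','p','2']
  · subst h10; decide
  by_cases h11 : e = ['.','z','i','p']
  · subst h11; decide
  by_cases h12 : e = ['.','r','a','r']
  · subst h12; decide
  by_cases h13 : e = ['.','7','z']
  · subst h13; decide
  by_cases h14 : e = ['.','p','d','f']
  · subst h14; decide
  by_cases h15 : e = ['.','d','o','c']
  · subst h15; decide
  by_cases h16 : e = ['.','d','o','c','x']
  · subst h16; decide
  by_cases h17 : e = ['.','p','p','t']
  · subst h17; decide
  by_cases h18 : e = ['.','p','p','t','x']
  · subst h18; decide
  by_cases h19 : e = ['.','x','l','s']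
  · subst h19; decide
  by_cases h20 : e = ['.','x','l','s','x']
  · subst h20; decide
  by_cases h21 : e = ['.','s','w','f']
  · subst h21; decide
  by_cases h22 : e = ['.','m','p','3']
  · subst h22; decide
  by_cases h23 : e = ['.','m','p','4']
  · subst h23; decide
  by_cases h24 : e = ['.','m','k','v']
  · subst h24; decide
  simp [PySem.Dict.getD_eq_get?_getD, pvExtTable, PySem.Dict.get?_mk_cons, h1, h2, h3, h4, h5, h6, h7, h8, h9, h10, h11, h12, h13, h14, h15, h16, h17, h18, h19, h20, h21, h22, h23, h24, Ne.symm h1, Ne.symm h2, Ne.symm h3, Ne.symm h4, Ne.symm h5, Ne.symm h6, Ne.symm h7, Ne.symm h8, Ne.symm h9, Ne.symm h10, Ne.symm h11, Ne.symm h12, Ne.symm h13, Ne.symm h14, Ne.symm h15, Ne.symm h16, Ne.symm h17, Ne.symm h18, Ne.symm h19, Ne.symm h20, Ne.symm h21, Ne.symm h22, Ne.symm h23, Ne.symm h24]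
  rfl

theorem key (l : List Char) :
    (if ([".html".toList, ".htm".toList, ".php".toList, ".asp".toList] : List (List Char)).any
        (fun f => PySem.Chars.endswith l f) then true
     else if ([".jpg".toList, ".png".toList, ".ico".toList, ".gz".toList, ".xz".toList,
     ".bzip2".toList, ".zip".toList, ".rar".toList, ".7z".toList, ".pdf".toList,
     ".doc".toList, ".docx".toList, ".ppt".toList, ".pptx".toList, ".xls".toList,
     ".xlsx".toList, ".swf".toList, ".mp3".toList, ".mp4".toList, ".mkv".toList] : List (List Char)).any
        (fun f => PySem.Chars.endswith l f) then false
     else true)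
  = pvExtTable.getD (pvExt l) true := by
  rw [
      show (".html".toList) = ('.'::['h','t','m','l']) from by decide,
      show (".htm".toList) = ('.'::['h','t','m']) from by decide,
      show (".php".toList) = ('.'::['p','h','p']) from by decide,
      show (".asp".toList) = ('.'::['a','s','p']) from by decide,
      show (".jpg".toList) = ('.'::['j','p','g']) from by decide,
      show (".png".toList) = ('.'::['p','n','g']) from by decide,
      show (".ico".toList) = ('.'::['i','c','o']) from by decide,
      show (".gz".toList) = ('.'::['g','z']) from by decide,
      show (".xz".toList) = ('.'::['x','z']) from by decide,
      show (".bzip2".toList) = ('.'::['b','z','i','p','2']) from by decide,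
      show (".zip".toList) = ('.'::['z','i','p']) from by decide,
      show (".rar".toList) = ('.'::['r','a','r']) from by decide,
      show (".7z".toList) = ('.'::['7','z']) from by decide,
      show (".pdf".toList) = ('.'::['p','d','f']) from by decide,
      show (".doc".toList) = ('.'::['d','o','c']) from by decide,
      show (".docx".toList) = ('.'::['d','o','c','x']) from by decide,
      show (".ppt".toList) = ('.'::['p','p','t']) from by decide,
      show (".pptx".toList) = ('.'::['p','p','t','x']) from by decide,
      show (".xls".toList) = ('.'::['x','l','s']) from by decide,
      show (".xlsx".toList) = ('.'::['x','l','s','x']) from by decide,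
      show (".swf".toList) = ('.'::['s','w','f']) from by decide,
      show (".mp3".toList) = ('.'::['m','p','3']) from by decide,
      show (".mp4".toList) = ('.'::['m','p','4']) from by decide,
      show (".mkv".toList) = ('.'::['m','k','v']) from by decide]
  simp only [List.any_cons, List.any_nil, Bool.or_false]
  rw [ends_ext _ _ (by decide), ends_ext _ _ (by decide), ends_ext _ _ (by decide),
      ends_ext _ _ (by decide), ends_ext _ _ (by decide), ends_ext _ _ (by decide),
      ends_ext _ _ (by decide), ends_ext _ _ (by decide), ends_ext _ _ (by decide),
      ends_ext _ _ (by decide), ends_ext _ _ (by decide), ends_ext _ _ (by decide),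
      ends_ext _ _ (by decide), ends_ext _ _ (by decide), ends_ext _ _ (by decide),
      ends_ext _ _ (by decide), ends_ext _ _ (by decide), ends_ext _ _ (by decide),
      ends_ext _ _ (by decide), ends_ext _ _ (by decide), ends_ext _ _ (by decide),
      ends_ext _ _ (by decide), ends_ext _ _ (by decide), ends_ext _ _ (by decide)]
  exact table_eq (pvExt l)

-- ===== VERDICT (by name: the statement is the Claim_ definition above) =====
theorem is_WebPage_spec : Claim_equal_is_WebPage := by
  intro url real_url _
  unfold Spec_is_WebPage
  cases real_url with
  | none => exact key (PySem.Chars.lower url.toList)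
  | some ru => exact key (PySem.Chars.lower ru.toList)
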